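-- pv_equiv track=rewrite | github.com/bryancostanich/rekolektion | src/rekolektion/array/tiler.py | _compute_column_layout
-- ===== SOURCE A (Python) =====
-- from typing import List, Tuple
--
-- def _compute_column_layout(
--     num_cols: int,
--     strap_interval: int,
-- ) -> List[str]:
--     """Compute the column layout including WL strap insertions.
--
--     Returns a list of column types: "bit" for bitcell columns,
--     "strap" for WL strap columns.  Strap columns are inserted
--     every `strap_interval` bitcell columns.
--     """
--     if strap_interval <= 0:
--         return ["bit"] * num_cols
--
--     layout: List[str] = []
--     bit_count = 0
--     for _ in range(num_cols):
--         if bit_count > 0 and bit_count % strap_interval == 0: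
--             layout.append("strap")
--         layout.append("bit")
--         bit_count += 1
--
--     return layout
-- ===== SOURCE B (Python) =====
-- from typing import List
--
-- def _compute_column_layout(
--     num_cols: int,
--     strap_interval: int,
-- ) -> List[str]:
--     if strap_interval <= 0:
--         return ["bit"] * num_cols
--
--     layout: List[str] = []
--     for start in range(0, num_cols, strap_interval):
--         if layout:
--             layout.append("strap")
--         layout += ["bit"] * min(strap_interval, num_cols - start)
--     return layout
-- ===== Notes on version B (the rewrite author's own statement) =====
-- stated objective: faster
-- what changed: B builds the layout group-by-group over range(0, num_cols, strap_interval), emitting one replicated chunk of 'bit's per strap group with a 'strap' separator before every chunk but the first, replacing A's per-column Python-level loop with a running-count modulo test by O(n/strap_interval) bulk list extends.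
import Mathlib
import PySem

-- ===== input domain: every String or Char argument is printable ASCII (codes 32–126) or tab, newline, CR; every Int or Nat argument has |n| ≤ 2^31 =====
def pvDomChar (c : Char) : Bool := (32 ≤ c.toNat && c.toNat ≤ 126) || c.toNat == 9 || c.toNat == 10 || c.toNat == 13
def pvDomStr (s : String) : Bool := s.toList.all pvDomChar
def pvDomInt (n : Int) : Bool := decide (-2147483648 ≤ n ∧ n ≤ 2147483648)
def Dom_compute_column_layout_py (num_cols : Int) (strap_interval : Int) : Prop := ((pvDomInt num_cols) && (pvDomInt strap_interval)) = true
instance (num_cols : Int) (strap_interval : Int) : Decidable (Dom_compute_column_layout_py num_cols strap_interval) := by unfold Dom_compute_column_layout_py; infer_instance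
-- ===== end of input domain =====

-- B builds the layout group-by-group (one chunk of "bit"s per strap group, a "strap"
-- separator before every chunk but the first) instead of A's per-column modulo test;
-- same result, a different decomposition (objective: alternative).

-- ===== PORT A =====
def compute_column_layout_py (num_cols : Int) (strap_interval : Int) : List String :=
  if strap_interval ≤ 0 then
    List.replicate num_cols.toNat "bit"
  else
    ((PySem.List.pyRange 0 num_cols 1).foldl
      (fun (st : List String × Int) _ =>
        ((if 0 < st.2 ∧ PySem.Int.mod st.2 strap_interval = 0 then st.1 ++ ["strap"] else st.1)
           ++ ["bit"],
         st.2 + 1))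
      ([], 0)).1

-- ===== PORT B =====
def compute_column_layout_py_alt (num_cols : Int) (strap_interval : Int) : List String :=
  if strap_interval ≤ 0 then
    List.replicate num_cols.toNat "bit"
  else
    (PySem.List.pyRange 0 num_cols strap_interval).foldl
      (fun layout start =>
        (if layout ≠ [] then layout ++ ["strap"] else layout)
          ++ List.replicate (min strap_interval (num_cols - start)).toNat "bit")
      []

-- ===== PRECONDITION & SPEC =====
def Spec_compute_column_layout_py (num_cols : Int) (strap_interval : Int) (out : List String) : Prop := out = compute_column_layout_py_alt num_cols strap_interval
instance (num_cols : Int) (strap_interval : Int) (out : List String) : Decidable (Spec_compute_column_layout_py num_cols strap_interval out) := by unfold Spec_compute_column_layout_py; infer_instance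

-- ===== CLAIM (what is proved, stated in full; the proofs are below) =====
def Claim_equal_compute_column_layout_py : Prop := ∀ (num_cols : Int) (strap_interval : Int), Dom_compute_column_layout_py num_cols strap_interval → Spec_compute_column_layout_py num_cols strap_interval (compute_column_layout_py num_cols strap_interval)

-- ===== LEMMAS AND PROOFS =====

lemma pvRange_pos_nil (a b s : Int) (hs : 0 < s) (hba : b ≤ a) :
    PySem.List.pyRange a b s = [] := by
  rw [PySem.List.pyRange_of_pos _ _ hs, if_neg (by omega)]
  simp

lemma pvRange_pos_cons (a b s : Int) (hs : 0 < s) (hab : a < b) :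
    PySem.List.pyRange a b s = a :: PySem.List.pyRange (a + s) b s := by
  rw [PySem.List.pyRange_of_pos _ _ hs, PySem.List.pyRange_of_pos _ _ hs]
  have hcount : (if a < b then ((b - a + s - 1) / s).toNat else 0)
      = (if a + s < b then ((b - (a + s) + s - 1) / s).toNat else 0) + 1 := by
    rw [if_pos hab]
    by_cases h : a + s < b
    · rw [if_pos h]
      have h1 : b - a + s - 1 = (b - (a + s) + s - 1) + 1 * s := by ring
      have h2 : (b - a + s - 1) / s = (b - (a + s) + s - 1) / s + 1 := by
        rw [h1, Int.add_mul_ediv_right _ _ (ne_of_gt hs)]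
      have h3 : 0 ≤ (b - (a + s) + s - 1) / s := Int.ediv_nonneg (by omega) (by omega)
      omega
    · rw [if_neg h]
      have h1 : b - a + s - 1 = (b - a - 1) + 1 * s := by ring
      have h2 : (b - a - 1) / s = 0 := Int.ediv_eq_zero_of_lt (by omega) (by omega)
      have h3 : (b - a + s - 1) / s = 1 := by
        rw [h1, Int.add_mul_ediv_right _ _ (ne_of_gt hs)]; omega
      rw [h3]; rfl
  rw [hcount, List.range_succ_eq_map]
  simp only [List.map_cons, List.map_map]
  congr 1
  · simp
  · apply List.map_congr_left
    intro k _
    simp only [Function.comp_apply, Nat.succ_eq_add_one]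
    push_cast
    ring

def pvU (si p : Int) : List String :=
  (if 0 < p ∧ PySem.Int.mod p si = 0 then ["strap"] else []) ++ ["bit"]

def pvChunk (si n s : Int) : List String :=
  "strap" :: List.replicate (min si (n - s)).toNat "bit"

lemma pvA_foldl (si : Int) (l : List Int) (L : List String) (c : Int) :
    (l.foldl (fun (st : List String × Int) _ =>
        ((if 0 < st.2 ∧ PySem.Int.mod st.2 si = 0 then st.1 ++ ["strap"] else st.1)
           ++ ["bit"], st.2 + 1)) (L, c)).1
      = L ++ (List.range l.length).flatMap (fun k : Nat => pvU si (c + (k : Int))) := by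
  induction l generalizing L c with
  | nil => simp
  | cons x xs ih =>
    simp only [List.foldl_cons, List.length_cons, List.range_succ_eq_map,
      List.flatMap_cons, List.flatMap_map]
    rw [ih]
    have hfun : (fun k : Nat => pvU si (c + (k.succ : Int)))
        = fun k : Nat => pvU si (c + 1 + (k : Int)) := by
      funext k; push_cast; ring_nf
    rw [hfun]
    have hhead : L ++ pvU si (c + ((0 : Nat) : Int))
        = (if 0 < c ∧ PySem.Int.mod c si = 0 then L ++ ["strap"] else L) ++ ["bit"] := by
      by_cases hc : 0 < c ∧ PySem.Int.mod c si = 0 <;> simp [pvU, hc]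
    rw [← List.append_assoc, hhead]

lemma pvB_foldl (si n : Int) (l : List Int) (L : List String) (hL : L ≠ []) :
    l.foldl (fun layout start =>
        (if layout ≠ [] then layout ++ ["strap"] else layout)
          ++ List.replicate (min si (n - start)).toNat "bit") L
      = L ++ l.flatMap (pvChunk si n) := by
  induction l generalizing L with
  | nil => simp
  | cons x xs ih =>
    simp only [List.foldl_cons, List.flatMap_cons]
    have hne : L ++ ["strap"] ++ List.replicate (min si (n - x)).toNat "bit" ≠ [] := by
      apply List.append_ne_nil_of_left_ne_nil
      apply List.append_ne_nil_of_right_ne_nil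
      simp
    rw [if_pos hL, ih _ hne]
    simp [pvChunk]

lemma pvShift (si n a : Int) (hsi : 0 < si) :
    (PySem.List.pyRange (a + si) n si).flatMap (pvChunk si n)
      = (PySem.List.pyRange a (n - si) si).flatMap (pvChunk si (n - si)) := by
  rw [PySem.List.pyRange_of_pos _ _ hsi, PySem.List.pyRange_of_pos _ _ hsi]
  have hc : (if a + si < n then ((n - (a + si) + si - 1) / si).toNat else 0)
      = (if a < n - si then ((n - si - a + si - 1) / si).toNat else 0) := by
    have h1 : n - (a + si) + si - 1 = n - si - a + si - 1 := by ring
    rw [h1]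
    by_cases h : a + si < n
    · rw [if_pos h, if_pos (by omega)]
    · rw [if_neg h, if_neg (by omega)]
  rw [hc, List.flatMap_map, List.flatMap_map]
  have hfun : (fun k : Nat => pvChunk si n (a + si + si * (k : Int)))
      = fun k : Nat => pvChunk si (n - si) (a + si * (k : Int)) := by
    funext k
    have harg : n - (a + si + si * (k : Int)) = n - si - (a + si * (k : Int)) := by ring
    simp only [pvChunk, harg]
  rw [hfun]

def pvBv (num_cols si : Int) : List String :=
  (PySem.List.pyRange 0 num_cols si).foldl
    (fun layout start =>
      (if layout ≠ [] then layout ++ ["strap"] else layout)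
        ++ List.replicate (min si (num_cols - start)).toNat "bit")
    []

lemma pvB_open (n si : Int) (hsi : 0 < si) (hn : 0 < n) :
    pvBv n si = List.replicate (min si n).toNat "bit"
      ++ (PySem.List.pyRange si n si).flatMap (pvChunk si n) := by
  unfold pvBv
  rw [pvRange_pos_cons 0 n si hsi hn, List.foldl_cons]
  have h1 : (if ([] : List String) ≠ [] then ([] : List String) ++ ["strap"] else [])
      ++ List.replicate (min si (n - 0)).toNat "bit"
      = List.replicate (min si n).toNat "bit" := by simp
  rw [h1, pvB_foldl si n _ _ (by simp [hsi, hn])]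
  rw [zero_add]

lemma pvB_rec (n si : Int) (hsi : 0 < si) (hn : 0 < n) :
    pvBv n si = List.replicate (min si n).toNat "bit"
      ++ (if si < n then "strap" :: pvBv (n - si) si else []) := by
  rw [pvB_open n si hsi hn]
  congr 1
  have hsh := pvShift si n 0 hsi
  rw [zero_add] at hsh
  rw [hsh]
  by_cases h : si < n
  · rw [if_pos h, pvRange_pos_cons 0 (n - si) si hsi (by omega), List.flatMap_cons,
      zero_add, pvB_open (n - si) si hsi (by omega)]
    simp [pvChunk]
  · rw [if_neg h, pvRange_pos_nil 0 (n - si) si hsi (by omega)]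
    simp

lemma pvA_chunk (si : Int) (hsi : 0 < si) (m : Nat) (hm : m ≤ si.toNat) :
    (List.range m).flatMap (fun k : Nat => pvU si (k : Int)) = List.replicate m "bit" := by
  induction m with
  | zero => simp
  | succ m ih =>
    rw [List.range_succ, List.flatMap_append, ih (by omega), List.replicate_succ']
    congr 1
    simp only [List.flatMap_cons, List.flatMap_nil, List.append_nil]
    have hcond : ¬ (0 < (m : Int) ∧ PySem.Int.mod (m : Int) si = 0) := by
      rintro ⟨h1, h2⟩
      rw [PySem.Int.mod_eq_zero_iff_dvd] at h2
      have := Int.le_of_dvd h1 h2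
      omega
    simp only [pvU]
    rw [if_neg hcond]
    rfl

lemma pvA_rec (si : Int) (hsi : 0 < si) (m : Nat) (hm : 0 < m) :
    (List.range m).flatMap (fun k : Nat => pvU si (k : Int))
      = List.replicate (min si.toNat m) "bit"
        ++ (if si.toNat < m then
              "strap" :: (List.range (m - si.toNat)).flatMap (fun k : Nat => pvU si (k : Int))
            else []) := by
  by_cases h : si.toNat < m
  · rw [if_pos h]
    have hm2 : m = si.toNat + (m - si.toNat) := by omega
    rw [hm2, List.range_add, List.flatMap_append, List.flatMap_map,
      pvA_chunk si hsi si.toNat le_rfl]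
    have hmin : min si.toNat (si.toNat + (m - si.toNat)) = si.toNat := by omega
    rw [hmin]
    congr 1
    obtain ⟨r, hr⟩ : ∃ r, m - si.toNat = r + 1 := ⟨m - si.toNat - 1, by omega⟩
    rw [hr, List.range_succ_eq_map]
    simp only [List.flatMap_cons, List.flatMap_map]
    have hhead : pvU si ((si.toNat + 0 : Nat) : Int) = ["strap", "bit"] := by
      have hs' : ((si.toNat + 0 : Nat) : Int) = si := by omega
      rw [hs']
      have hdvd : PySem.Int.mod si si = 0 := by
        rw [PySem.Int.mod_eq_zero_iff_dvd]
      simp [pvU, hdvd, hsi]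
    rw [hhead]
    have htail : (fun k : Nat => pvU si ((si.toNat + k.succ : Nat) : Int))
        = fun k : Nat => pvU si ((k.succ : Nat) : Int) := by
      funext k
      have h1 : ((si.toNat + k.succ : Nat) : Int) = si + (k.succ : Int) := by push_cast; omega
      rw [h1]
      unfold pvU
      congr 1
      have hiff : (0 < si + ((k.succ : Nat) : Int) ∧ PySem.Int.mod (si + ((k.succ:Nat) : Int)) si = 0)
          ↔ (0 < ((k.succ:Nat) : Int) ∧ PySem.Int.mod ((k.succ:Nat) : Int) si = 0) := by
        rw [PySem.Int.mod_eq_zero_iff_dvd, PySem.Int.mod_eq_zero_iff_dvd,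
          dvd_add_right (dvd_refl si)]
        constructor
        · rintro ⟨h1, h2⟩; exact ⟨by positivity, h2⟩
        · rintro ⟨h1, h2⟩; exact ⟨by omega, h2⟩
      rw [if_congr hiff rfl rfl]
    rw [htail]
    have hlen : si.toNat + (r + 1) - si.toNat = r + 1 := by omega
    rw [hlen, List.range_succ_eq_map]
    simp only [List.flatMap_cons, List.flatMap_map]
    have h0 : pvU si ((0 : Nat) : Int) = ["bit"] := by simp [pvU]
    rw [h0]
    rfl
  · rw [if_neg h]
    have hmin : min si.toNat m = m := by omega
    rw [hmin, pvA_chunk si hsi m (by omega), List.append_nil]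

lemma pvMain (si : Int) (hsi : 0 < si) :
    ∀ m : Nat, ∀ n : Int, n.toNat = m →
      (List.range m).flatMap (fun k : Nat => pvU si (k : Int)) = pvBv n si := by
  intro m
  induction m using Nat.strong_induction_on with
  | _ m ih =>
    intro n hn
    by_cases h0 : n ≤ 0
    · have hm0 : m = 0 := by omega
      subst hm0
      unfold pvBv
      rw [pvRange_pos_nil 0 n si hsi (by omega)]
      simp
    · push_neg at h0
      rw [pvB_rec n si hsi h0, pvA_rec si hsi m (by omega)]
      congr 1
      · congr 1
        omega
      · by_cases h2 : si < n
        · rw [if_pos h2, if_pos (by omega)]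
          exact congrArg _ (ih (m - si.toNat) (by omega) (n - si) (by omega))
        · rw [if_neg h2, if_neg (by omega)]

-- ===== VERDICT (by name: the statement is the Claim_ definition above) =====
theorem compute_column_layout_py_spec : Claim_equal_compute_column_layout_py := by
  unfold Claim_equal_compute_column_layout_py
  intro n si _
  unfold Spec_compute_column_layout_py
  by_cases h : si ≤ 0
  · simp [compute_column_layout_py, compute_column_layout_py_alt, h]
  · push_neg at h
    have hA : compute_column_layout_py n si
        = (List.range n.toNat).flatMap (fun k : Nat => pvU si (k : Int)) := by
      unfold compute_column_layout_py
      rw [if_neg (by omega)]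
      rw [pvA_foldl]
      simp [PySem.List.length_pyRange_one]
    have hB : compute_column_layout_py_alt n si = pvBv n si := by
      unfold compute_column_layout_py_alt pvBv
      rw [if_neg (by omega)]
    rw [hA, hB, pvMain si h n.toNat n rfl]
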